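-- pv_equiv track=rewrite | github.com/zifshaka-source/flameschecker | flames.py | cancel_common_letters
-- ===== SOURCE A (Python) =====
-- def cancel_common_letters(name_a, name_b):
--     """Remove matching letters between two names (standard FLAMES method)."""
--     name_a = list(name_a.lower())
--     name_b = list(name_b.lower())
--
--     i = 0
--     while i < len(name_a):
--         if name_a[i] in name_b:
--             j = name_b.index(name_a[i])
--             name_a.pop(i)
--             name_b.pop(j)
--             # Don't increment i — recheck same position after removal
--         else:
--             i += 1
--
--     return "".join(name_a), "".join(name_b)
-- ===== SOURCE B (Python) =====
-- def cancel_common_letters(name_a, name_b):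
--     """Remove matching letters between two names (standard FLAMES method)."""
--     a = name_a.lower()
--     b = name_b.lower()
--
--     count_a = {}
--     for ch in a:
--         count_a[ch] = count_a.get(ch, 0) + 1
--     count_b = {}
--     for ch in b:
--         count_b[ch] = count_b.get(ch, 0) + 1
--
--     # A letter's k-th occurrence survives iff k exceeds the other name's total
--     # for that letter (the first min(count_a, count_b) occurrences cancel).
--     out_a = []
--     seen = {}
--     for ch in a:
--         seen[ch] = seen.get(ch, 0) + 1
--         if seen[ch] > count_b.get(ch, 0):
--             out_a.append(ch)
--
--     out_b = []
--     seen = {}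
--     for ch in b:
--         seen[ch] = seen.get(ch, 0) + 1
--         if seen[ch] > count_a.get(ch, 0):
--             out_b.append(ch)
--
--     return "".join(out_a), "".join(out_b)
-- ===== Notes on version B (the rewrite author's own statement) =====
-- stated objective: faster
-- what changed: Replaces A's while-loop that repeatedly scans name_b (membership test + list.index) and pops from both lists with two letter-count dictionaries and one linear keep-or-skip pass per name (a letter's k-th occurrence survives iff k exceeds the other name's count of that letter).
import Mathlib
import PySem

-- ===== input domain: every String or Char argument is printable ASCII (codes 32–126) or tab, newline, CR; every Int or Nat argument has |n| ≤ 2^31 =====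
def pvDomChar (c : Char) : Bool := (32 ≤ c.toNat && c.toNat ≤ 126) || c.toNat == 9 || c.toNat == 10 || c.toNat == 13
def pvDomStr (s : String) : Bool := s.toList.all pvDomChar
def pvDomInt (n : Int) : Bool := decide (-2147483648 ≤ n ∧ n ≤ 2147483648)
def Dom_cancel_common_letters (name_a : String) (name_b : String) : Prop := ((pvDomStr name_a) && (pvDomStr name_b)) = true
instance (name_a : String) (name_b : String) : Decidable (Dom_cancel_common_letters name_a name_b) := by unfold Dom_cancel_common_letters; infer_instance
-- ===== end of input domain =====

-- B replaces A's quadratic pop/index while-loop by count dictionaries and one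
-- keep-or-skip pass per name (objective: faster, O(n+m) vs O(n·m)).

-- ===== PORT A =====
-- the while-loop of A: i is the cursor, the two lists are the mutable name lists
def pvLoopA (name_a : List Char) (name_b : List Char) (i : Nat) : List Char × List Char :=
  if h : i < name_a.length then
    if name_a[i] ∈ name_b then
      -- j = name_b.index(name_a[i]); name_a.pop(i); name_b.pop(j)  (index? is some here: membership was just checked)
      pvLoopA (name_a.eraseIdx i) (name_b.eraseIdx ((PySem.List.index? name_b name_a[i]).getD 0)) i
    else
      pvLoopA name_a name_b (i + 1)
  else (name_a, name_b)
termination_by name_a.length - i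
decreasing_by
  · simp [List.length_eraseIdx, h]; omega
  · omega

def cancel_common_letters (name_a : String) (name_b : String) : String × String :=
  let la := (PySem.Str.lower name_a).toList
  let lb := (PySem.Str.lower name_b).toList
  let r := pvLoopA la lb 0
  (String.ofList r.1, String.ofList r.2)

-- ===== PORT B =====
-- count_x[ch] = count_x.get(ch, 0) + 1 loop
def pvCount (xs : List Char) : PySem.Dict Char Int :=
  xs.foldl (fun d ch => d.insert ch (d.getD ch 0 + 1)) PySem.Dict.empty

-- body of B's filter loop: state = (seen, out)
def pvFiltStep (cnt : PySem.Dict Char Int) (p : PySem.Dict Char Int × List Char) (ch : Char) :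
    PySem.Dict Char Int × List Char :=
  let seen := p.1.insert ch (p.1.getD ch 0 + 1)
  (seen, if cnt.getD ch 0 < seen.getD ch 0 then p.2 ++ [ch] else p.2)

def cancel_common_letters_alt (name_a : String) (name_b : String) : String × String :=
  let a := (PySem.Str.lower name_a).toList
  let b := (PySem.Str.lower name_b).toList
  let count_a := pvCount a
  let count_b := pvCount b
  let out_a := (a.foldl (pvFiltStep count_b) (PySem.Dict.empty, ([] : List Char))).2
  let out_b := (b.foldl (pvFiltStep count_a) (PySem.Dict.empty, ([] : List Char))).2
  (String.ofList out_a, String.ofList out_b)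

-- ===== PRECONDITION & SPEC =====
def Spec_cancel_common_letters (name_a : String) (name_b : String) (out : String × String) : Prop := out = cancel_common_letters_alt name_a name_b
instance (name_a : String) (name_b : String) (out : String × String) : Decidable (Spec_cancel_common_letters name_a name_b out) := by unfold Spec_cancel_common_letters; infer_instance

-- ===== CLAIM (what is proved, stated in full; the proofs are below) =====
def Claim_equal_cancel_common_letters : Prop := ∀ (name_a : String) (name_b : String), Dom_cancel_common_letters name_a name_b → Spec_cancel_common_letters name_a name_b (cancel_common_letters name_a name_b)

-- ===== LEMMAS AND PROOFS =====

-- structural version of A's loop: process the first remaining char of a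
def pvG : List Char → List Char → List Char × List Char
  | [], b => ([], b)
  | c :: a, b => if c ∈ b then pvG a (b.erase c) else (c :: (pvG a b).1, (pvG a b).2)

-- skip the first (cap c) occurrences of each char c
def pvSkip : List Char → (Char → Nat) → List Char
  | [], _ => []
  | c :: xs, cap =>
    if 0 < cap c then pvSkip xs (fun d => if d = c then cap d - 1 else cap d)
    else c :: pvSkip xs cap

theorem pvEraseIdx_index (b : List Char) (c : Char) (h : c ∈ b) :
    b.eraseIdx ((PySem.List.index? b c).getD 0) = b.erase c := by
  induction b with
  | nil => cases h
  | cons x t ih =>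
    by_cases hx : x = c
    · subst hx
      rw [PySem.List.index?_cons_self, List.erase_cons_head]
      rfl
    · have hct : c ∈ t := by
        cases h with
        | head => exact absurd rfl hx
        | tail _ h' => exact h'
      rw [PySem.List.index?_cons_of_ne t hx]
      obtain ⟨j, hj⟩ := Option.isSome_iff_exists.mp ((PySem.List.index?_isSome_iff t c).mpr hct)
      rw [hj, List.erase_cons_tail (by simpa using hx)]
      have := ih hct
      rw [hj] at this
      simpa [List.eraseIdx_cons_succ] using this

theorem pvLoopA_eq (a b : List Char) (i : Nat) :
    pvLoopA a b i = (a.take i ++ (pvG (a.drop i) b).1, (pvG (a.drop i) b).2) := by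
  induction a, b, i using pvLoopA.induct with
  | case1 a b i h hmem ih =>
    rw [pvLoopA, dif_pos h, if_pos hmem, ih]
    have hdrop : a.drop i = a[i] :: a.drop (i + 1) := List.drop_eq_getElem_cons h
    have herase : a.eraseIdx i = a.take i ++ a.drop (i + 1) := List.eraseIdx_eq_take_drop_succ a i
    have hlen : (a.take i).length = i := List.length_take_of_le (le_of_lt h)
    rw [pvEraseIdx_index b a[i] hmem, herase]
    rw [List.take_left' hlen, List.drop_left' hlen]
    rw [hdrop, pvG, if_pos hmem]

  | case2 a b i h hmem ih =>
    rw [pvLoopA, dif_pos h, if_neg hmem, ih]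
    have hdrop : a.drop i = a[i] :: a.drop (i + 1) := List.drop_eq_getElem_cons h
    have htake : a.take (i + 1) = a.take i ++ [a[i]] := by
      rw [List.take_add_one]; simp [List.getElem?_eq_getElem h]
    rw [hdrop, pvG, if_neg hmem, Prod.mk.injEq]
    refine ⟨?_, rfl⟩
    rw [htake, List.append_assoc]
    rfl
  | case3 a b i h =>
    rw [pvLoopA, dif_neg h]
    have hle : a.length ≤ i := le_of_not_gt h
    simp [List.drop_eq_nil_of_le hle, List.take_of_length_le hle, pvG]

theorem pvSkip_congr (xs : List Char) (cap cap' : Char → Nat)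
    (h : ∀ c ∈ xs, cap c = cap' c) : pvSkip xs cap = pvSkip xs cap' := by
  induction xs generalizing cap cap' with
  | nil => rfl
  | cons x t ih =>
    have hx := h x (List.mem_cons_self ..)
    by_cases h0 : 0 < cap x
    · rw [pvSkip, pvSkip, if_pos h0, if_pos (hx ▸ h0)]
      exact ih _ _ (fun c hc => by by_cases hcx : c = x <;> simp [hcx, hx, h c (List.mem_cons_of_mem _ hc)])
    · rw [pvSkip, pvSkip, if_neg h0, if_neg (hx ▸ h0)]
      exact congrArg _ (ih _ _ (fun c hc => h c (List.mem_cons_of_mem _ hc)))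

theorem pvSkip_of_zero (xs : List Char) (cap : Char → Nat)
    (h : ∀ c ∈ xs, cap c = 0) : pvSkip xs cap = xs := by
  induction xs generalizing cap with
  | nil => rfl
  | cons x t ih =>
    rw [pvSkip, if_neg (by simp [h x (List.mem_cons_self ..)])]
    exact congrArg _ (ih _ (fun c hc => h c (List.mem_cons_of_mem _ hc)))

theorem pvSkip_succ_erase (b : List Char) (c : Char) (cap : Char → Nat) (h : c ∈ b) :
    pvSkip b (fun d => if d = c then cap d + 1 else cap d) = pvSkip (b.erase c) cap := by
  induction b generalizing cap with
  | nil => cases h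
  | cons x t ih =>
    by_cases hx : x = c
    · subst hx
      rw [List.erase_cons_head, pvSkip, if_pos (by simp)]
      exact pvSkip_congr _ _ _ (fun d _ => by by_cases hd : d = x <;> simp [hd])
    · have hct : c ∈ t := by
        cases h with
        | head => exact absurd rfl hx
        | tail _ h' => exact h'
      rw [List.erase_cons_tail (by simp [hx])]
      by_cases h0 : 0 < cap x
      · rw [pvSkip, if_pos (by simp [hx, h0]), pvSkip, if_pos h0]
        rw [← ih _ hct]
        exact pvSkip_congr _ _ _ (fun d _ => by
          by_cases hd : d = c
          · subst hd; simp [Ne.symm hx]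
          · by_cases hdx : d = x <;> simp [hd, hdx, hx])
      · rw [pvSkip, if_neg (by simp [hx, h0]), pvSkip, if_neg h0, ih _ hct]

theorem pvG_fst (a b : List Char) : (pvG a b).1 = pvSkip a (fun c => b.count c) := by
  induction a generalizing b with
  | nil => rfl
  | cons c a ih =>
    by_cases hc : c ∈ b
    · rw [pvG, if_pos hc, ih, pvSkip, if_pos (List.count_pos_iff.mpr hc)]
      exact pvSkip_congr _ _ _ (fun d _ => by
        by_cases hd : d = c <;> simp [hd])
    · rw [pvG, if_neg hc]
      simp only
      rw [ih, pvSkip, if_neg (by simp [List.count_eq_zero_of_not_mem hc])]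

theorem pvG_snd (a b : List Char) : (pvG a b).2 = pvSkip b (fun c => a.count c) := by
  induction a generalizing b with
  | nil => exact (pvSkip_of_zero b _ (fun c _ => by simp)).symm
  | cons c a ih =>
    by_cases hc : c ∈ b
    · rw [pvG, if_pos hc, ih]
      rw [← pvSkip_succ_erase b c (fun d => a.count d) hc]
      exact pvSkip_congr _ _ _ (fun d _ => by
        by_cases hd : d = c
        · subst hd; simp
        · simp [hd, show ¬c = d from fun he => hd he.symm])
    · rw [pvG, if_neg hc]
      simp only
      rw [ih]
      exact pvSkip_congr _ _ _ (fun d hd => by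
        have hne : d ≠ c := fun he => hc (he ▸ hd)
        simp [show ¬c = d from fun he => hne he.symm])

theorem pvCount_getD (xs : List Char) (c : Char) : (pvCount xs).getD c 0 = (xs.count c : Int) := by
  rw [pvCount, PySem.Dict.foldl_insert_getD_add_one_eq_counter, PySem.Dict.getD_counter]

theorem pvFilt_eq (cnt : PySem.Dict Char Int) (xs : List Char)
    (seen : PySem.Dict Char Int) (acc : List Char) :
    (xs.foldl (pvFiltStep cnt) (seen, acc)).2
      = acc ++ pvSkip xs (fun c => (cnt.getD c 0 - seen.getD c 0).toNat) := by
  induction xs generalizing seen acc with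
  | nil => simp [pvSkip]
  | cons ch t ih =>
    rw [List.foldl_cons]
    have hget : (seen.insert ch (seen.getD ch 0 + 1)).getD ch 0 = seen.getD ch 0 + 1 := by
      rw [PySem.Dict.getD_insert, if_pos rfl]
    by_cases hlt : cnt.getD ch 0 < seen.getD ch 0 + 1
    · -- kept
      rw [show pvFiltStep cnt (seen, acc) ch
            = (seen.insert ch (seen.getD ch 0 + 1), acc ++ [ch]) by
          simp [pvFiltStep, hget, hlt]]
      rw [ih, List.append_assoc]
      congr 1
      rw [pvSkip, if_neg (by omega), List.singleton_append]
      congr 1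
      apply pvSkip_congr
      intro c _
      by_cases hc : c = ch
      · subst hc; rw [hget]; omega
      · rw [PySem.Dict.getD_insert]; simp [hc]
    · -- skipped
      rw [show pvFiltStep cnt (seen, acc) ch
            = (seen.insert ch (seen.getD ch 0 + 1), acc) by
          simp [pvFiltStep, hget, hlt]]
      rw [ih]
      rw [pvSkip, if_pos (by omega)]
      congr 1
      apply pvSkip_congr
      intro c _
      by_cases hc : c = ch
      · subst hc; rw [hget, if_pos rfl]; omega
      · rw [PySem.Dict.getD_insert]; simp [hc]

-- ===== VERDICT (by name: the statement is the Claim_ definition above) =====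
theorem cancel_common_letters_spec : Claim_equal_cancel_common_letters := by
  intro name_a name_b _
  unfold Spec_cancel_common_letters cancel_common_letters cancel_common_letters_alt
  set la := (PySem.Str.lower name_a).toList with hla
  set lb := (PySem.Str.lower name_b).toList with hlb
  have hA : pvLoopA la lb 0 = ((pvG la lb).1, (pvG la lb).2) := by
    simpa using pvLoopA_eq la lb 0
  have ha : (la.foldl (pvFiltStep (pvCount lb)) (PySem.Dict.empty, ([] : List Char))).2
      = pvSkip la (fun c => lb.count c) := by
    rw [pvFilt_eq]
    simp only [List.nil_append]
    apply pvSkip_congr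
    intro c _
    simp [pvCount_getD, PySem.Dict.getD_empty]
  have hb : (lb.foldl (pvFiltStep (pvCount la)) (PySem.Dict.empty, ([] : List Char))).2
      = pvSkip lb (fun c => la.count c) := by
    rw [pvFilt_eq]
    simp only [List.nil_append]
    apply pvSkip_congr
    intro c _
    simp [pvCount_getD, PySem.Dict.getD_empty]
  simp only [hA, ha, hb, pvG_fst, pvG_snd]
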